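-- pv_equiv track=rewrite | github.com/ScottCTD/Programming-Practices | LeetCode/python/Q2659.py | countOperationsToEmptyArray
-- ===== SOURCE A (Python) =====
-- from typing import List
--
-- def countOperationsToEmptyArray(nums: List[int]) -> int:
--     s = sorted(nums)
--     i = 0
--     n = len(nums)
--     l = n - 1
--     a = 0
--     count = 0
--     while i < n:
--         count += 1
--         min_ = s[a]
--         if nums[i] == min_:
--             i += 1
--             a += 1
--         else:
--             nums.append(nums[i])
--             i += 1
--             n += 1
--             l += 1
--
--     return count
-- ===== SOURCE B (Python) =====
-- # B: repeated-pass simulation over a shrinking survivor queue (return value only;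
-- # unlike A, B does not mutate its argument).
-- def countOperationsToEmptyArray(nums):
--     s = sorted(nums)
--     a = 0
--     q = list(nums)
--     count = 0
--     while q:
--         count += len(q)
--         nxt = []
--         for x in q:
--             if x == s[a]:
--                 a += 1
--             else:
--                 nxt.append(x)
--         q = nxt
--     return count
-- ===== Notes on version B (the rewrite author's own statement) =====
-- stated objective: alternative
-- what changed: Replaced the single forward scan over a self-growing array with index bookkeeping by a repeated-pass simulation that rebuilds a shrinking survivor queue each round and adds the queue length per pass; A mutates its argument while B does not (return value equivalence).
import Mathlib
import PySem

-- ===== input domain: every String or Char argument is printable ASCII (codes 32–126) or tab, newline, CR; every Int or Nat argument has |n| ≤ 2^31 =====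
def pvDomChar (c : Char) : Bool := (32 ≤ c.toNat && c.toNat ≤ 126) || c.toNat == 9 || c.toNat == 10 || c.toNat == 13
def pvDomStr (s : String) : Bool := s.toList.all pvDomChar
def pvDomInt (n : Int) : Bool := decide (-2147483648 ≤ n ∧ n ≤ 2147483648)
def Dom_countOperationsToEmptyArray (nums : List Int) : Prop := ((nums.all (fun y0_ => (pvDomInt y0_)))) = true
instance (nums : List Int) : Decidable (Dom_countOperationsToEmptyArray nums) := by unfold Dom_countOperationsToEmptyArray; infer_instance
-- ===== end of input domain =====

-- One honest line: B replaces A's single scan over a self-growing array (with index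
-- bookkeeping) by a repeated-pass simulation over a shrinking survivor queue; return
-- value only — A mutates its argument (appends to nums), B does not.

-- ===== PORT A =====
-- A's while loop, step for step; 'fuel' is a totality guard only (A's loop always
-- terminates; the proof shows (n+1)^2 iterations always suffice). 'l' is A's dead
-- variable, kept for faithfulness.
def loopA (s : List Int) (fuel : Nat) (nums : List Int) (i n l a count : Int) : Int :=
  match fuel with
  | 0 => count
  | fuel + 1 =>
    if i < n then
      let count := count + 1
      let min_ := (PySem.List.pyGet? s a).getD 0
      if (PySem.List.pyGet? nums i).getD 0 = min_ then
        loopA s fuel nums (i + 1) n l (a + 1) count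
      else
        loopA s fuel (nums ++ [(PySem.List.pyGet? nums i).getD 0]) (i + 1) (n + 1) (l + 1) a count
    else count

def countOperationsToEmptyArray (nums : List Int) : Int :=
  let s := PySem.List.sorted nums (fun x => x) false
  loopA s ((nums.length + 1) * (nums.length + 1)) nums 0 (nums.length : Int)
    ((nums.length : Int) - 1) 0 0

-- ===== PORT B =====
-- Source B step for step: the body of B's inner 'for x in q' loop ('s[a]' is read with
-- getD 0; Python would raise there, which is unreachable from the entry point).
def passStep (s : List Int) (st : Nat × List Int) (x : Int) : Nat × List Int :=
  if x = s.getD st.1 0 then (st.1 + 1, st.2) else (st.1, st.2 ++ [x])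

-- Source B's outer 'while q' loop; 'fuel' is a totality guard only (each pass removes at
-- least one element, so nums.length + 1 passes always suffice).
def runB (s : List Int) (fuel : Nat) (a : Nat) (q : List Int) (count : Int) : Int :=
  match fuel with
  | 0 => count
  | fuel + 1 =>
    if q = [] then count
    else
      let st := q.foldl (passStep s) (a, [])
      runB s fuel st.1 st.2 (count + q.length)

def countOperationsToEmptyArray_alt (nums : List Int) : Int :=
  runB (PySem.List.sorted nums (fun x => x) false) (nums.length + 1) 0 nums 0

-- ===== PRECONDITION & SPEC =====
def Spec_countOperationsToEmptyArray (nums : List Int) (out : Int) : Prop := out = countOperationsToEmptyArray_alt nums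
instance (nums : List Int) (out : Int) : Decidable (Spec_countOperationsToEmptyArray nums out) := by unfold Spec_countOperationsToEmptyArray; infer_instance

-- ===== CLAIM (what is proved, stated in full; the proofs are below) =====
def Claim_equal_countOperationsToEmptyArray : Prop := ∀ (nums : List Int), Dom_countOperationsToEmptyArray nums → Spec_countOperationsToEmptyArray nums (countOperationsToEmptyArray nums)

-- ===== LEMMAS AND PROOFS =====

-- A's dead variable 'l' never affects the result.
theorem loopA_l_irrel (s : List Int) : ∀ (fuel : Nat) (nums : List Int) (i n a count l l' : Int),
    loopA s fuel nums i n l a count = loopA s fuel nums i n l' a count := by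
  intro fuel
  induction fuel with
  | zero => intro nums i n a count l l'; rfl
  | succ f ih =>
    intro nums i n a count l l'
    simp only [loopA]
    split
    · split
      · exact ih _ _ _ _ _ _ _
      · exact ih _ _ _ _ _ _ _
    · rfl

-- One pass of A's loop (from position pre.length to the end of the current queue q)
-- performs exactly B's fold over q, appending the survivors.
theorem loopA_pass (s : List Int) (l : Int) : ∀ (q pre acc : List Int) (a : Nat) (count : Int) (fuel : Nat),
    q.length ≤ fuel →
    loopA s fuel (pre ++ q ++ acc) (pre.length : Int) (((pre ++ q ++ acc).length : Nat) : Int) l (a : Int) count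
      = loopA s (fuel - q.length)
          (pre ++ q ++ (q.foldl (passStep s) (a, acc)).2)
          ((pre.length + q.length : Nat) : Int)
          (((pre ++ q ++ (q.foldl (passStep s) (a, acc)).2).length : Nat) : Int)
          l ((q.foldl (passStep s) (a, acc)).1 : Int) (count + q.length) := by
  intro q
  induction q with
  | nil =>
    intro pre acc a count fuel hf
    simp
  | cons x q ih =>
    intro pre acc a count fuel hf
    match fuel, hf with
    | f + 1, hf =>
      have hf' : q.length ≤ f := by simpa using hf
      have hassoc : pre ++ (x :: q) ++ acc = pre ++ (x :: (q ++ acc)) := by simp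
      have hlt : ((pre.length : Nat) : Int) < (((pre ++ (x :: q) ++ acc).length : Nat) : Int) := by
        simp [List.length_append]
        omega
      have hget : (PySem.List.pyGet? (pre ++ (x :: q) ++ acc) ((pre.length : Nat) : Int)).getD 0 = x := by
        rw [hassoc, PySem.List.pyGet?_append_length]
        rfl
      have hmin : (PySem.List.pyGet? s ((a : Nat) : Int)).getD 0 = s.getD a 0 := by
        rw [PySem.List.pyGet?_natCast]
        rw [List.getD_eq_getElem?_getD]
      simp only [loopA, if_pos hlt, hget, hmin]
      by_cases hx : x = s.getD a 0
      · rw [if_pos hx]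
        have h := ih (pre ++ [x]) acc (a + 1) (count + 1) f hf'
        simp only [List.foldl_cons, passStep, if_pos hx]
        simp only [List.append_assoc, List.cons_append, List.nil_append,
          List.length_append, List.length_cons, List.length_nil, Nat.succ_sub_succ] at h ⊢
        push_cast at h ⊢
        ring_nf at h ⊢
        exact h
      · rw [if_neg hx]
        have h := ih (pre ++ [x]) (acc ++ [x]) a (count + 1) f hf'
        simp only [List.foldl_cons, passStep, if_neg hx]
        simp only [List.append_assoc, List.cons_append, List.nil_append,
          List.length_append, List.length_cons, List.length_nil, Nat.succ_sub_succ] at h ⊢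
        rw [loopA_l_irrel s f _ _ _ _ _ (l + 1) l]
        push_cast at h ⊢
        ring_nf at h ⊢
        exact h

-- The first component of B's pass fold only grows.
theorem pass_fst_mono (s : List Int) : ∀ (q acc : List Int) (a : Nat),
    a ≤ (q.foldl (passStep s) (a, acc)).1 := by
  intro q
  induction q with
  | nil => intro acc a; exact le_rfl
  | cons x q ih =>
    intro acc a
    simp only [List.foldl_cons, passStep]
    split
    · exact le_trans (Nat.le_succ a) (ih acc (a + 1))
    · exact ih (acc ++ [x]) a

-- If the current minimum occurs in q, the pass removes at least one element.
theorem pass_progress (s : List Int) : ∀ (q acc : List Int) (a : Nat),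
    s.getD a 0 ∈ q → a < (q.foldl (passStep s) (a, acc)).1 := by
  intro q
  induction q with
  | nil => intro acc a h; exact absurd h (List.not_mem_nil)
  | cons x q ih =>
    intro acc a h
    simp only [List.foldl_cons, passStep]
    by_cases hx : x = s.getD a 0
    · rw [if_pos hx]
      exact lt_of_lt_of_le (Nat.lt_succ_self a) (pass_fst_mono s q acc (a + 1))
    · rw [if_neg hx]
      rcases List.mem_cons.mp h with h1 | h1
      · exact absurd h1.symm hx
      · exact ih (acc ++ [x]) a h1

-- Pass invariant: survivors + already-kept elements stay the multiset of the
-- still-unremoved tail of the sorted list.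
theorem pass_mset (s : List Int) : ∀ (q acc : List Int) (a : Nat),
    (q ++ acc).Perm (s.drop a) →
    ((q.foldl (passStep s) (a, acc)).2).Perm (s.drop (q.foldl (passStep s) (a, acc)).1) := by
  intro q
  induction q with
  | nil =>
    intro acc a h
    simpa using h
  | cons x q ih =>
    intro acc a h
    have hx : x ∈ s.drop a := h.mem_iff.mp (by simp)
    have ha : a < s.length := by
      by_contra hc
      rw [List.drop_eq_nil_of_le (Nat.le_of_not_lt hc)] at hx
      exact absurd hx (List.not_mem_nil)
    have hdrop : s.drop a = s[a] :: s.drop (a + 1) := List.drop_eq_getElem_cons ha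
    have hgetD : s.getD a 0 = s[a] := List.getD_eq_getElem s 0 ha
    simp only [List.foldl_cons, passStep]
    by_cases hcase : x = s.getD a 0
    · rw [if_pos hcase]
      apply ih
      rw [hcase, hgetD, hdrop] at h
      exact List.Perm.cons_inv h
    · rw [if_neg hcase]
      apply ih
      have h1 : (q ++ (acc ++ [x])).Perm (x :: (q ++ acc)) := by
        rw [← List.append_assoc]
        exact List.perm_append_singleton x (q ++ acc)
      exact h1.trans (by simpa using h)

-- Main correspondence between A's loop and B's pass loop.
theorem loopA_nil (s : List Int) (fuelA : Nat) (pre : List Int) (a : Nat) (count l : Int) :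
    loopA s fuelA (pre ++ []) (pre.length : Int) (((pre ++ []).length : Nat) : Int) l (a : Int) count
      = count := by
  cases fuelA with
  | zero => rfl
  | succ f => simp [loopA]

theorem mainLoop (s : List Int) : ∀ (N : Nat) (q pre : List Int) (a : Nat) (count : Int)
    (fuelA fuelB : Nat) (l : Int),
    q.length ≤ N →
    q.Perm (s.drop a) →
    q.length * q.length + q.length ≤ fuelA →
    q.length + 1 ≤ fuelB →
    loopA s fuelA (pre ++ q) (pre.length : Int) (((pre ++ q).length : Nat) : Int) l (a : Int) count
      = runB s fuelB a q count := by
  intro N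
  induction N with
  | zero =>
    intro q pre a count fuelA fuelB l hN hperm hA hB
    have hq : q = [] := List.eq_nil_of_length_eq_zero (Nat.le_zero.mp hN)
    subst hq
    rw [loopA_nil]
    cases fuelB with
    | zero => rfl
    | succ fB => simp [runB]
  | succ N ihN =>
    intro q pre a count fuelA fuelB l hN hperm hA hB
    by_cases hq : q = []
    · subst hq
      rw [loopA_nil]
      cases fuelB with
      | zero => rfl
      | succ fB => simp [runB]
    · cases fuelB with
      | zero => simp at hB
      | succ fB =>
        have hlen : q.length = s.length - a := by
          rw [hperm.length_eq, List.length_drop]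
        have ha : a < s.length := by
          have : q.length ≠ 0 := fun h => hq (List.eq_nil_of_length_eq_zero h)
          omega
        have hmem : s.getD a 0 ∈ q := by
          rw [List.getD_eq_getElem s 0 ha]
          apply hperm.mem_iff.mpr
          rw [List.drop_eq_getElem_cons ha]
          exact List.mem_cons_self
        have hprog : a < (q.foldl (passStep s) (a, [])).1 := pass_progress s q [] a hmem
        have hinv : ((q.foldl (passStep s) (a, [])).2).Perm
            (s.drop (q.foldl (passStep s) (a, [])).1) := pass_mset s q [] a (by simpa using hperm)
        have hlen2 : (q.foldl (passStep s) (a, [])).2.length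
            = s.length - (q.foldl (passStep s) (a, [])).1 := by
          rw [hinv.length_eq, List.length_drop]
        have hlt : (q.foldl (passStep s) (a, [])).2.length < q.length := by omega
        have hle : q.length ≤ fuelA := Nat.le_trans (Nat.le_add_left _ _) hA
        have hpass := loopA_pass s l q pre [] a count fuelA hle
        have hA' : (q.foldl (passStep s) (a, [])).2.length * (q.foldl (passStep s) (a, [])).2.length
            + (q.foldl (passStep s) (a, [])).2.length ≤ fuelA - q.length := by
          have hmul : ((q.foldl (passStep s) (a, [])).2.length + 1)
              * ((q.foldl (passStep s) (a, [])).2.length + 1) ≤ q.length * q.length :=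
            Nat.mul_le_mul hlt hlt
          have hexp : ((q.foldl (passStep s) (a, [])).2.length + 1)
              * ((q.foldl (passStep s) (a, [])).2.length + 1)
              = (q.foldl (passStep s) (a, [])).2.length * (q.foldl (passStep s) (a, [])).2.length
                + 2 * (q.foldl (passStep s) (a, [])).2.length + 1 := by ring
          omega
        have h2 := ihN (q.foldl (passStep s) (a, [])).2 (pre ++ q) (q.foldl (passStep s) (a, [])).1
          (count + (q.length : Int)) (fuelA - q.length) fB l (by omega) hinv hA' (by omega)
        simp only [List.append_nil] at hpass
        rw [hpass]
        simp only [runB, if_neg hq]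
        simp only [List.append_assoc, List.length_append] at h2 ⊢
        exact h2

-- ===== VERDICT (by name: the statement is the Claim_ definition above) =====
theorem countOperationsToEmptyArray_spec : Claim_equal_countOperationsToEmptyArray := by
  intro nums _
  unfold Spec_countOperationsToEmptyArray countOperationsToEmptyArray countOperationsToEmptyArray_alt
  have hperm : (PySem.List.sorted nums (fun x => x) false).Perm nums :=
    PySem.List.sorted_perm nums (fun x => x) false
  have hm : nums.Perm ((PySem.List.sorted nums (fun x => x) false).drop 0) := by
    simpa using hperm.symm
  have hsq : nums.length * nums.length + nums.length
      ≤ (nums.length + 1) * (nums.length + 1) := by nlinarith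
  have h := mainLoop (PySem.List.sorted nums (fun x => x) false) nums.length nums [] 0 0
    ((nums.length + 1) * (nums.length + 1)) (nums.length + 1) ((nums.length : Int) - 1)
    le_rfl hm hsq le_rfl
  simpa using h
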